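-- pv_equiv track=rewrite | github.com/ajay501-python/AI_Task_Recommender | task_recommender.py | recommend_tasks
-- ===== SOURCE A (Python) =====
-- def recommend_tasks(sentiment, plan):
--     priority_order = {'High': 3, 'Medium': 2, 'Low': 1}
--
--     if sentiment == "a bit low":
--         filtered = [t for t in plan if t["priority"] in ["Low", "Medium"]]
--     elif sentiment == "good":
--         filtered = [t for t in plan if t["priority"] in ["High", "Medium"]]
--     else:
--         filtered = [t for t in plan if t["priority"] == "Medium"]
--
--     sorted_tasks = sorted(filtered, key=lambda x: priority_order.get(x['priority'], 0), reverse=True)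
--     return sorted_tasks
-- ===== SOURCE B (Python) =====
-- def recommend_tasks(sentiment, plan):
--     # Bucket by priority instead of sorting: emit allowed priorities in rank order,
--     # scanning plan in original order for each -- same stable descending result.
--     if sentiment == "a bit low":
--         allowed = ["Medium", "Low"]
--     elif sentiment == "good":
--         allowed = ["High", "Medium"]
--     else:
--         allowed = ["Medium"]
--     return [t for p in allowed for t in plan if t["priority"] == p]
-- ===== Notes on version B (the rewrite author's own statement) =====
-- stated objective: alternative
-- what changed: Replaces filter-then-comparison-sort with bucketing: iterate the allowed priorities in descending rank and collect matching tasks from plan in original order, so no sorted() call and no priority_order dict.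
import Mathlib
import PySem

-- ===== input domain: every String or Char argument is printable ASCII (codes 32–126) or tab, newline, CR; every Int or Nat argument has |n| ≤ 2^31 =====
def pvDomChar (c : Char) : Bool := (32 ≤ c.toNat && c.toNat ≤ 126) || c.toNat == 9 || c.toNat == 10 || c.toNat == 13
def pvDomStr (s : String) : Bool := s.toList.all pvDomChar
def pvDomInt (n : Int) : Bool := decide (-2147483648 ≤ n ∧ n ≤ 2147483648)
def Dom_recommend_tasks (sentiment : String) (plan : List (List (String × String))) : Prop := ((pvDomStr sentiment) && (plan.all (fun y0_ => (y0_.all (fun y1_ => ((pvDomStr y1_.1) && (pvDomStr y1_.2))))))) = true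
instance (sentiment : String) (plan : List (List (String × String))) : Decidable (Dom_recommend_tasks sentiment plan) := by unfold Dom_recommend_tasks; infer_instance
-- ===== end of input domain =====

-- B buckets by the fixed descending priority ranking instead of filtering and calling a
-- comparison sort; equal output (stable, descending by priority) on every input where A returns.

-- ===== PORT A =====
-- t["priority"] (Pre_ guarantees the key is present, so the default is never used)
def pvPrio (t : List (String × String)) : String := (PySem.Dict.mk t).getD "priority" ""

-- priority_order.get(x['priority'], 0)
def pvKey (t : List (String × String)) : Int :=
  (PySem.Dict.mk [("High", (3 : Int)), ("Medium", 2), ("Low", 1)]).getD (pvPrio t) 0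

def recommend_tasks (sentiment : String) (plan : List (List (String × String))) : List (List (String × String)) :=
  PySem.List.sorted
    (if sentiment = "a bit low" then plan.filter (fun t => ["Low", "Medium"].contains (pvPrio t))
     else if sentiment = "good" then plan.filter (fun t => ["High", "Medium"].contains (pvPrio t))
     else plan.filter (fun t => pvPrio t == "Medium"))
    pvKey true

-- ===== PORT B =====
def recommend_tasks_alt (sentiment : String) (plan : List (List (String × String))) : List (List (String × String)) :=
  (if sentiment = "a bit low" then ["Medium", "Low"]
   else if sentiment = "good" then ["High", "Medium"]
   else ["Medium"]).flatMap (fun p => plan.filter (fun t => pvPrio t == p))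

-- ===== PRECONDITION & SPEC =====
-- Pre_ excludes exactly the inputs where some task dict lacks the "priority" key:
-- there Python's t["priority"] raises KeyError (in A and in B alike).
def Pre_recommend_tasks (sentiment : String) (plan : List (List (String × String))) : Prop :=
  (plan.all (fun t => ((PySem.Dict.mk t).get? "priority").isSome)) = true
instance (sentiment : String) (plan : List (List (String × String))) : Decidable (Pre_recommend_tasks sentiment plan) := by unfold Pre_recommend_tasks; infer_instance

def pvWitness_recommend_tasks : String × (List (List (String × String))) :=
  ("good", [[("priority", "Low")], [("priority", "High")], [("priority", "Medium")]])

def Spec_recommend_tasks (sentiment : String) (plan : List (List (String × String))) (out : List (List (String × String))) : Prop := out = recommend_tasks_alt sentiment plan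
instance (sentiment : String) (plan : List (List (String × String))) (out : List (List (String × String))) : Decidable (Spec_recommend_tasks sentiment plan out) := by unfold Spec_recommend_tasks; infer_instance

-- ===== CLAIM (what is proved, stated in full; the proofs are below) =====
def Claim_equal_recommend_tasks : Prop := ∀ (sentiment : String) (plan : List (List (String × String))), Dom_recommend_tasks sentiment plan → Pre_recommend_tasks sentiment plan → Spec_recommend_tasks sentiment plan (recommend_tasks sentiment plan)

-- ===== LEMMAS AND PROOFS =====

-- insertBy skips over a prefix it does not insert before
theorem insertBy_append_left {α : Type} (before : α → α → Bool) (x : α) (H L : List α)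
    (h : ∀ y ∈ H, before x y = false) :
    PySem.List.insertBy before x (H ++ L) = H ++ PySem.List.insertBy before x L := by
  induction H with
  | nil => simp
  | cons y H ih =>
    have hy := h y (by simp)
    simp [PySem.List.insertBy, hy, ih (fun z hz => h z (by simp [hz]))]

-- stable descending insertion over two key values = the two buckets in order
theorem foldl_insert_two {α : Type} (key : α → Int) (hi lo : Int) (hlt : lo < hi) :
    ∀ (xs H L : List α), (∀ y ∈ H, key y = hi) → (∀ y ∈ L, key y = lo) →
      (∀ x ∈ xs, key x = hi ∨ key x = lo) →
      xs.foldl (fun acc x => PySem.List.insertBy (fun a b => decide (key b < key a)) x acc) (H ++ L)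
        = (H ++ xs.filter (fun x => key x == hi)) ++ (L ++ xs.filter (fun x => key x == lo)) := by
  intro xs
  induction xs with
  | nil => intro H L _ _ _; simp
  | cons x xs ih =>
    intro H L hH hL hk
    rcases hk x (by simp) with hx | hx
    · have hstep : PySem.List.insertBy (fun a b => decide (key b < key a)) x (H ++ L)
          = (H ++ [x]) ++ L := by
        rw [insertBy_append_left _ x H L (fun y hy => by simp [hH y hy, hx])]
        cases L with
        | nil => simp [PySem.List.insertBy]
        | cons l L' =>
          have : key l = lo := hL l (by simp)
          simp [PySem.List.insertBy, this, hx, hlt]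
      have := ih (H ++ [x]) L
        (fun y hy => by rcases List.mem_append.mp hy with h | h
                        · exact hH y h
                        · simp at h; simp [h, hx])
        hL (fun z hz => hk z (by simp [hz]))
      have e1 : (key x == hi) = true := by simp [hx]
      have e2 : (key x == lo) = false := by simp [hx]; omega
      simp only [List.foldl_cons, hstep, this, List.filter_cons, e1, e2, if_true, if_false,
        cond_true, cond_false, Bool.false_eq_true, ite_false, ite_true]
      simp [List.append_assoc]
    · have hstep : PySem.List.insertBy (fun a b => decide (key b < key a)) x (H ++ L)
          = H ++ (L ++ [x]) := by
        rw [← List.append_assoc]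
        exact PySem.List.insertBy_of_forall_not_before _ x (H ++ L)
          (fun y hy => by rcases List.mem_append.mp hy with h | h
                          · simp [hH y h, hx]; omega
                          · simp [hL y h, hx])
      have := ih H (L ++ [x]) hH
        (fun y hy => by rcases List.mem_append.mp hy with h | h
                        · exact hL y h
                        · simp at h; simp [h, hx])
        (fun z hz => hk z (by simp [hz]))
      have e1 : (key x == lo) = true := by simp [hx]
      have e2 : (key x == hi) = false := by simp [hx]; omega
      simp only [List.foldl_cons, hstep, this, List.filter_cons, e1, e2, if_true, if_false,
        cond_true, cond_false, Bool.false_eq_true, ite_false, ite_true]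
      simp [List.append_assoc]

theorem sorted_two_buckets {α : Type} (key : α → Int) (hi lo : Int) (hlt : lo < hi)
    (xs : List α) (hk : ∀ x ∈ xs, key x = hi ∨ key x = lo) :
    PySem.List.sorted xs key true
      = xs.filter (fun x => key x == hi) ++ xs.filter (fun x => key x == lo) := by
  rw [PySem.List.sorted_rev_eq_foldl_insertBy]
  have := foldl_insert_two key hi lo hlt xs [] [] (by simp) (by simp) hk
  simpa using this

-- pvKey on a string value of pvPrio
theorem pvKey_eq (t : List (String × String)) :
    pvKey t = if pvPrio t = "High" then 3 else if pvPrio t = "Medium" then 2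
              else if pvPrio t = "Low" then 1 else 0 := by
  unfold pvKey
  by_cases h1 : pvPrio t = "High"
  · simp [PySem.Dict.getD, PySem.Dict.get?, h1]
  · by_cases h2 : pvPrio t = "Medium"
    · simp [PySem.Dict.getD, PySem.Dict.get?, h1, h2]
    · by_cases h3 : pvPrio t = "Low"
      · simp [PySem.Dict.getD, PySem.Dict.get?, h3]
      · have e1 : ("High" == pvPrio t) = false := by
          simp only [beq_eq_false_iff_ne]; exact fun h => h1 h.symm
        have e2 : ("Medium" == pvPrio t) = false := by
          simp only [beq_eq_false_iff_ne]; exact fun h => h2 h.symm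
        have e3 : ("Low" == pvPrio t) = false := by
          simp only [beq_eq_false_iff_ne]; exact fun h => h3 h.symm
        simp [PySem.Dict.getD, PySem.Dict.get?, List.find?, e1, e2, e3, h1, h2, h3]

-- ===== VERDICT (by name: the statement is the Claim_ definition above) =====
theorem recommend_tasks_spec : Claim_equal_recommend_tasks := by
  intro sentiment plan _ _
  unfold Spec_recommend_tasks recommend_tasks recommend_tasks_alt
  by_cases hs1 : sentiment = "a bit low"
  · simp only [hs1, String.reduceEq, reduceIte, List.flatMap_cons, List.flatMap_nil,
      List.append_nil]
    rw [sorted_two_buckets pvKey 2 1 (by omega) _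
        (fun t ht => by
          have hm := List.of_mem_filter ht
          simp only [List.contains_eq_mem, List.mem_cons, List.not_mem_nil, or_false,
            decide_eq_true_eq] at hm
          rw [pvKey_eq]
          rcases hm with h | h <;> simp [h])]
    rw [List.filter_filter, List.filter_filter]
    congr 1
    · apply List.filter_congr
      intro t _
      rw [pvKey_eq]
      by_cases h1 : pvPrio t = "Medium" <;> by_cases h2 : pvPrio t = "Low" <;>
        simp_all [List.contains_eq_mem]
    · apply List.filter_congr
      intro t _
      rw [pvKey_eq]
      by_cases h1 : pvPrio t = "Medium" <;> by_cases h2 : pvPrio t = "Low" <;>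
        simp_all [List.contains_eq_mem]
  · by_cases hs2 : sentiment = "good"
    · simp only [hs2, String.reduceEq, reduceIte, List.flatMap_cons, List.flatMap_nil,
        List.append_nil]
      rw [sorted_two_buckets pvKey 3 2 (by omega) _
          (fun t ht => by
            have hm := List.of_mem_filter ht
            simp only [List.contains_eq_mem, List.mem_cons, List.not_mem_nil, or_false,
              decide_eq_true_eq] at hm
            rw [pvKey_eq]
            rcases hm with h | h <;> simp [h])]
      rw [List.filter_filter, List.filter_filter]
      congr 1
      · apply List.filter_congr
        intro t _
        rw [pvKey_eq]
        by_cases h1 : pvPrio t = "High" <;> by_cases h2 : pvPrio t = "Medium" <;>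
          simp_all [List.contains_eq_mem]
      · apply List.filter_congr
        intro t _
        rw [pvKey_eq]
        by_cases h1 : pvPrio t = "High" <;> by_cases h2 : pvPrio t = "Medium" <;>
          simp_all [List.contains_eq_mem]
    · simp only [hs1, hs2, reduceIte, List.flatMap_cons, List.flatMap_nil, List.append_nil]
      apply PySem.List.sorted_rev_eq_self_of_pairwise
      apply List.pairwise_of_forall_mem_list
      intro a ha b hb
      have ha' := List.of_mem_filter ha
      have hb' := List.of_mem_filter hb
      simp only [beq_iff_eq] at ha' hb'
      rw [pvKey_eq, pvKey_eq, ha', hb']
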